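-- pv_equiv track=rewrite | github.com/bertichelucas/Algo1---Ejercicios | Dicccionarios/cant_precesores_por_palabra.py | cant_precesores_por_palabra
-- ===== SOURCE A (Python) =====
-- def cant_precesores_por_palabra(cadena):
--     resultado = {}
--     lista_palabras = cadena.split(' ')
--     anterior = None
--     for palabra in lista_palabras:
--         if palabra not in resultado:
--             resultado[palabra] = {}
--         if anterior != None:
--             if anterior not in resultado[palabra]:
--                 resultado[palabra][anterior] = 1
--             else:
--                 resultado[palabra][anterior] += 1
--         anterior = palabra
--     return resultado
-- ===== SOURCE B (Python) =====
-- def cant_precesores_por_palabra(cadena):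
--     palabras = cadena.split(' ')
--     resultado = {}
--     for w in palabras:
--         if w in resultado:
--             continue
--         preds = {}
--         for i in range(1, len(palabras)):
--             if palabras[i] == w:
--                 p = palabras[i - 1]
--                 preds[p] = preds.get(p, 0) + 1
--         resultado[w] = preds
--     return resultado
-- ===== Notes on version B (the rewrite author's own statement) =====
-- stated objective: alternative
-- what changed: Replaces A's single stateful pass threading a previous-word variable with a group-by formulation: for each distinct word (first-occurrence order) a dedicated index scan over the word list collects and counts its predecessors, so no cross-word dict state or previous-word variable is threaded.
import Mathlib
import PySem

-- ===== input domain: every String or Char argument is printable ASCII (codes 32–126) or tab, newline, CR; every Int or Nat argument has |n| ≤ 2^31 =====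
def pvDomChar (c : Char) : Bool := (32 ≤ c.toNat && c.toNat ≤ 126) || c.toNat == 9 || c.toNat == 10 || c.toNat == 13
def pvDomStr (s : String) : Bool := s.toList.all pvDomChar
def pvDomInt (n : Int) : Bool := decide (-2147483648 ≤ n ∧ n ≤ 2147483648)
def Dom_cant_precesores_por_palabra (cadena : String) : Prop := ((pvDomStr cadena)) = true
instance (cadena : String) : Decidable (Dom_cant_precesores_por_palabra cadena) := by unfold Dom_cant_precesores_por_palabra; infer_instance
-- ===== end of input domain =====

-- B replaces A's single stateful pass (threading the previous word through a dict-of-dicts with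
-- membership guards) by a group-by formulation: for each distinct word, in first-occurrence order,
-- a dedicated index scan over the word list collects and counts its predecessors.
-- Objective: alternative decomposition; not claimed faster.

-- ===== PORT A =====
-- literal transliteration of A: one fold over the words, state = (resultado, anterior)
def cant_precesores_por_palabra (cadena : String) : List (String × List (String × Int)) :=
  let lista_palabras := (PySem.Str.split? cadena " ").getD []
  let fin := lista_palabras.foldl
    (fun (st : PySem.Dict String (PySem.Dict String Int) × Option String) palabra =>
      let r1 := if !(st.1.contains palabra) then st.1.insert palabra PySem.Dict.empty else st.1
      let r2 := match st.2 with
        | none => r1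
        | some anterior =>
            r1.modify palabra PySem.Dict.empty (fun inner =>
              if !(inner.contains anterior) then inner.insert anterior 1
              else inner.modify anterior 0 (· + 1))
      (r2, some palabra))
    (PySem.Dict.empty, none)
  fin.1.items.map (fun p => (p.1, p.2.items))

-- ===== PORT B =====
-- literal transliteration of B: outer loop over the words skipping seen ones; for a new word w an
-- inner loop over range(1, len(palabras)) counts the predecessors of w
def cant_precesores_por_palabra_alt (cadena : String) : List (String × List (String × Int)) :=
  let palabras := (PySem.Str.split? cadena " ").getD []
  let resultado := palabras.foldl
    (fun (r : PySem.Dict String (PySem.Dict String Int)) w =>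
      if r.contains w then r
      else
        let preds := (PySem.List.pyRange 1 (palabras.length : Int) 1).foldl
          (fun (p : PySem.Dict String Int) i =>
            if PySem.List.pyGetD palabras i "" == w then
              let pr := PySem.List.pyGetD palabras (i - 1) ""
              p.insert pr (p.getD pr 0 + 1)
            else p)
          PySem.Dict.empty
        r.insert w preds)
    PySem.Dict.empty
  resultado.items.map (fun p => (p.1, p.2.items))

-- ===== PRECONDITION & SPEC =====
def Spec_cant_precesores_por_palabra (cadena : String) (out : List (String × List (String × Int))) : Prop := out = cant_precesores_por_palabra_alt cadena
instance (cadena : String) (out : List (String × List (String × Int))) : Decidable (Spec_cant_precesores_por_palabra cadena out) := by unfold Spec_cant_precesores_por_palabra; infer_instance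

-- ===== CLAIM (what is proved, stated in full; the proofs are below) =====
def Claim_equal_cant_precesores_por_palabra : Prop := ∀ (cadena : String), Dom_cant_precesores_por_palabra cadena → Spec_cant_precesores_por_palabra cadena (cant_precesores_por_palabra cadena)

-- ===== LEMMAS AND PROOFS =====

-- shorthand for the dict-of-dicts state
abbrev pvD2 : Type := PySem.Dict String (PySem.Dict String Int)

-- the inner-dict increment step shared by both proofs
def pvInc (p : PySem.Dict String Int) (pc : String × String) : PySem.Dict String Int :=
  p.insert pc.1 (p.getD pc.1 0 + 1)

-- A's key-ensuring step
def pvEns (d : pvD2) (w : String) : pvD2 :=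
  if !(d.contains w) then d.insert w PySem.Dict.empty else d

-- the counting step on an edge (prev, cur)
def pvCnt (d : pvD2) (pc : String × String) : pvD2 :=
  d.modify pc.2 PySem.Dict.empty (fun inner => pvInc inner pc)

-- A's full step
def pvStepA (st : pvD2 × Option String) (palabra : String) : pvD2 × Option String :=
  let r1 := pvEns st.1 palabra
  let r2 := match st.2 with
    | none => r1
    | some anterior =>
        r1.modify palabra PySem.Dict.empty (fun inner =>
          if !(inner.contains anterior) then inner.insert anterior 1
          else inner.modify anterior 0 (· + 1))
  (r2, some palabra)

-- B's predecessor table for a single word, phrased over the adjacent-pair list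
def pvPreds (ws : List String) (w : String) : PySem.Dict String Int :=
  (((ws.zip ws.tail).filter (fun pc => pc.2 == w)).foldl pvInc PySem.Dict.empty)

-- B's outer step, abstracted
def pvB (ws : List String) (r : pvD2) (w : String) : pvD2 :=
  if r.contains w then r else r.insert w (pvPreds ws w)

-- A's inner-dict update equals pvInc
lemma pvInc_eq (a : String) (inner : PySem.Dict String Int) :
    (if !(inner.contains a) then inner.insert a 1
     else inner.modify a 0 (· + 1)) = pvInc inner (a, a) := by
  by_cases h : inner.contains a = true
  · simp [h, PySem.Dict.modify, pvInc]
  · simp only [Bool.not_eq_true] at h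
    rw [pvInc]
    rw [PySem.Dict.getD_of_not_contains (h := h)]
    simp [h]

-- keys only grow under pvEns
lemma pvContains_ens (d : pvD2) (w c : String) (hc : d.contains c = true) :
    (pvEns d w).contains c = true := by
  by_cases hw : d.contains w = true
  · simp [pvEns, hw, hc]
  · simp only [Bool.not_eq_true] at hw
    simp [pvEns, hw, PySem.Dict.contains_insert, hc]

lemma pvContains_ens_self (d : pvD2) (w : String) : (pvEns d w).contains w = true := by
  by_cases hw : d.contains w = true
  · simp [pvEns, hw]
  · simp only [Bool.not_eq_true] at hw
    simp [pvEns, hw]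

lemma pvFold_ens_contains (ws : List String) (d : pvD2) (c : String) (hc : d.contains c = true) :
    (ws.foldl pvEns d).contains c = true := by
  induction ws generalizing d with
  | nil => exact hc
  | cons w rest ih => exact ih (pvEns d w) (pvContains_ens d w c hc)

lemma pvFold_ens_contains_of_mem (ws : List String) (d : pvD2) (c : String) (hc : c ∈ ws) :
    (ws.foldl pvEns d).contains c = true := by
  induction ws generalizing d with
  | nil => cases hc
  | cons w rest ih =>
    rcases List.mem_cons.mp hc with h | h
    · exact pvFold_ens_contains rest (pvEns d w) c (by rw [h]; exact pvContains_ens_self d w)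
    · exact ih (pvEns d w) h

lemma pvFold_ens_nodup (ws : List String) (d : pvD2) (h : d.keys.Nodup) :
    (ws.foldl pvEns d).keys.Nodup := by
  induction ws generalizing d with
  | nil => exact h
  | cons w rest ih =>
    apply ih
    by_cases hw : d.contains w = true
    · simpa [pvEns, hw] using h
    · simp only [Bool.not_eq_true] at hw
      simp only [pvEns, hw]
      simpa using PySem.Dict.nodup_keys_insert (d := d) (k := w) (v := PySem.Dict.empty) h

lemma pvFold_ens_values (ws : List String) (d : pvD2)
    (h : ∀ q ∈ d.items, q.2 = PySem.Dict.empty) :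
    ∀ q ∈ (ws.foldl pvEns d).items, q.2 = PySem.Dict.empty := by
  induction ws generalizing d with
  | nil => exact h
  | cons w rest ih =>
    apply ih
    intro q hq
    by_cases hw : d.contains w = true
    · exact h q (by simpa [pvEns, hw] using hq)
    · simp only [Bool.not_eq_true] at hw
      simp only [pvEns, hw] at hq
      rcases (PySem.Dict.mem_items_insert _ _ _ _).mp (by simpa using hq) with h1 | h1
      · rw [h1]
      · exact h q h1.1

-- counting at a present key commutes with ensuring another key (used by pvMain)
lemma pvInsert_comm (d : pvD2) (c w : String)
    (v u : PySem.Dict String Int) (hc : d.contains c = true) (hw : d.contains w = false) :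
    (d.insert c v).insert w u = (d.insert w u).insert c v := by
  have hcw : c ≠ w := by rintro rfl; rw [hc] at hw; cases hw
  have hwc : (w == c) = false := by simp [Ne.symm hcw]
  have h1 : (d.insert c v).contains w = false := by
    rw [PySem.Dict.contains_insert, hwc, hw]; rfl
  have h2 : (d.insert w u).contains c = true := by
    rw [PySem.Dict.contains_insert, hc]; simp
  apply PySem.Dict.ext
  rw [PySem.Dict.items_insert_of_not_contains _ _ h1,
      PySem.Dict.items_insert_of_contains _ _ hc,
      PySem.Dict.items_insert_of_contains _ _ h2,
      PySem.Dict.items_insert_of_not_contains _ _ hw]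
  simp
  intro e; exact absurd e (Ne.symm hcw)

lemma pvEns_cnt_comm (d : pvD2) (w : String) (pc : String × String)
    (hc : d.contains pc.2 = true) : pvEns (pvCnt d pc) w = pvCnt (pvEns d w) pc := by
  by_cases hw : d.contains w = true
  · have h1 : (pvCnt d pc).contains w = true := by
      simp [pvCnt, PySem.Dict.modify, PySem.Dict.contains_insert, hw]
    simp [pvEns, h1, hw]
  · simp only [Bool.not_eq_true] at hw
    have hcw : pc.2 ≠ w := by rintro e; rw [e] at hc; rw [hc] at hw; cases hw
    have h1 : (pvCnt d pc).contains w = false := by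
      rw [pvCnt, PySem.Dict.modify, PySem.Dict.contains_insert]
      rw [hw]
      simp [Ne.symm hcw]
    rw [show pvEns (pvCnt d pc) w = (pvCnt d pc).insert w PySem.Dict.empty from by
          simp [pvEns, h1],
        show pvEns d w = d.insert w PySem.Dict.empty from by simp [pvEns, hw]]
    simp only [pvCnt, PySem.Dict.modify]
    rw [PySem.Dict.getD_insert_of_ne _ _ _ hcw]
    exact pvInsert_comm d pc.2 w _ _ hc hw

lemma pvFold_ens_cnt_comm (ws : List String) (d : pvD2) (pc : String × String)
    (hc : d.contains pc.2 = true) :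
    ws.foldl pvEns (pvCnt d pc) = pvCnt (ws.foldl pvEns d) pc := by
  induction ws generalizing d with
  | nil => rfl
  | cons w rest ih =>
    rw [List.foldl_cons, List.foldl_cons, pvEns_cnt_comm d w pc hc,
        ih (pvEns d w) (pvContains_ens d w pc.2 hc)]

-- main invariant on A's side: A's interleaved fold = ensure-all, then count the adjacent pairs
lemma pvMain (ws : List String) (d : pvD2) (p : String) :
    (ws.foldl pvStepA (d, some p)).1 =
      ((p :: ws).zip ws).foldl pvCnt (ws.foldl pvEns d) := by
  induction ws generalizing d p with
  | nil => rfl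
  | cons w rest ih =>
    have hstep : pvStepA (d, some p) w = (pvCnt (pvEns d w) (p, w), some w) := by
      simp only [pvStepA, pvCnt]
      congr 2
      funext inner
      exact pvInc_eq p inner
    rw [List.foldl_cons, hstep, ih (pvCnt (pvEns d w) (p, w)) w,
        pvFold_ens_cnt_comm rest (pvEns d w) (p, w) (pvContains_ens_self d w)]
    rfl







-- distributing the counting fold over the entries of a dict with distinct, all-present keys
lemma pvFold_cnt_items (E : List (String × String)) (d : pvD2)
    (hc : ∀ pc ∈ E, d.contains pc.2 = true) (hnd : d.keys.Nodup) :
    (E.foldl pvCnt d).items =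
      d.items.map (fun q => (q.1, (E.filter (fun pc => pc.2 == q.1)).foldl pvInc q.2)) := by
  induction E generalizing d with
  | nil => simp
  | cons pc E' ih =>
    have hc2 : d.contains pc.2 = true := hc pc (by simp)
    have hg : (pvCnt d pc).items =
        d.items.map (fun q => if q.1 == pc.2 then (pc.2, pvInc q.2 pc) else q) := by
      rw [pvCnt, PySem.Dict.modify, PySem.Dict.items_insert_of_contains _ _ hc2]
      apply List.map_congr_left
      intro q hq
      by_cases h : (q.1 == pc.2) = true
      · have e : q.1 = pc.2 := beq_iff_eq.mp h
        have hq2 : (pc.2, q.2) ∈ d.items := by rw [← e]; exact hq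
        rw [PySem.Dict.getD_of_mem_items _ hq2 hnd]
      · simp [h]
    have hkeys : (pvCnt d pc).keys = d.keys := by
      simp only [PySem.Dict.keys, hg, List.map_map]
      apply List.map_congr_left
      intro q hq
      by_cases h : (q.1 == pc.2) = true
      · simp [Function.comp, (beq_iff_eq.mp h).symm]
      · simp [Function.comp, h]
    have hnd' : (pvCnt d pc).keys.Nodup := by rw [hkeys]; exact hnd
    have hc' : ∀ pc' ∈ E', (pvCnt d pc).contains pc'.2 = true := by
      intro pc' hpc'
      rw [PySem.Dict.contains_eq_decide_mem_keys, hkeys,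
          ← PySem.Dict.contains_eq_decide_mem_keys]
      exact hc pc' (List.mem_cons_of_mem pc hpc')
    rw [List.foldl_cons, ih (pvCnt d pc) hc' hnd', hg, List.map_map]
    apply List.map_congr_left
    intro q hq
    by_cases h : (pc.2 == q.1) = true
    · have e : q.1 = pc.2 := (beq_iff_eq.mp h).symm
      simp [e]
    · have hne : q.1 ≠ pc.2 := by
        intro e
        exact h (by simp [e])
      have h1 : (pc.2 == q.1) = false := by simpa using h
      simp [hne, h1]

-- the index pairs are exactly the adjacent pairs
lemma pvPairs_eq (ws : List String) :
    (List.range ((ws.length : Int) - 1).toNat).map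
      (fun k => (ws.getD k "", ws.getD (k + 1) "")) = ws.zip ws.tail := by
  apply List.ext_getElem
  · simp only [List.length_map, List.length_range, List.length_zip, List.length_tail]
    omega
  · intro i h1 h2
    simp only [List.length_map, List.length_range] at h1
    have hlen : i + 1 < ws.length := by omega
    simp only [List.getElem_map, List.getElem_range, List.getElem_zip, List.getElem_tail]
    rw [List.getD_eq_getElem ws "" (by omega), List.getD_eq_getElem ws "" (by omega)]

-- B's inner index loop computes pvPreds
lemma pvInner_eq (ws : List String) (w : String) :
    (PySem.List.pyRange 1 (ws.length : Int) 1).foldl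
      (fun (p : PySem.Dict String Int) i =>
        if PySem.List.pyGetD ws i "" == w then
          p.insert (PySem.List.pyGetD ws (i - 1) "")
            (p.getD (PySem.List.pyGetD ws (i - 1) "") 0 + 1)
        else p)
      PySem.Dict.empty = pvPreds ws w := by
  rw [PySem.List.pyRange_one, List.foldl_map]
  have hfun : (fun (p : PySem.Dict String Int) (k : Nat) =>
      if PySem.List.pyGetD ws (1 + (k : Int)) "" == w then
        p.insert (PySem.List.pyGetD ws (1 + (k : Int) - 1) "")
          (p.getD (PySem.List.pyGetD ws (1 + (k : Int) - 1) "") 0 + 1)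
      else p) =
      fun (p : PySem.Dict String Int) (k : Nat) =>
        (fun (p : PySem.Dict String Int) (pc : String × String) =>
          if pc.2 == w then pvInc p pc else p) p (ws.getD k "", ws.getD (k + 1) "") := by
    funext p k
    rw [show (1 : Int) + (k : Int) - 1 = ((k : Nat) : Int) from by omega,
        show (1 : Int) + (k : Int) = ((k + 1 : Nat) : Int) from by omega,
        PySem.List.pyGetD_natCast, PySem.List.pyGetD_natCast]
    simp [pvInc]
  rw [hfun, pvPreds, ← pvPairs_eq ws, ← PySem.List.foldl_if_eq_foldl_filter,
      List.foldl_map]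



-- the port-B outer step is pvB
lemma pvStepB_eq (ws : List String) :
    (fun (r : pvD2) w =>
      if r.contains w then r
      else
        r.insert w
          ((PySem.List.pyRange 1 (ws.length : Int) 1).foldl
            (fun (p : PySem.Dict String Int) i =>
              if PySem.List.pyGetD ws i "" == w then
                p.insert (PySem.List.pyGetD ws (i - 1) "")
                  (p.getD (PySem.List.pyGetD ws (i - 1) "") 0 + 1)
              else p)
            PySem.Dict.empty)) = pvB ws := by
  funext r w
  simp only [pvInner_eq ws w, pvB]

-- the ports, rephrased through the named step functions
lemma pvA_eq (cadena : String) :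
    cant_precesores_por_palabra cadena =
      ((((PySem.Str.split? cadena " ").getD []).foldl pvStepA
        (PySem.Dict.empty, none)).1.items).map (fun p => (p.1, p.2.items)) := rfl

lemma pvB_eq (cadena : String) :
    cant_precesores_por_palabra_alt cadena =
      (let ws := (PySem.Str.split? cadena " ").getD []
       ((ws.foldl (pvB ws) PySem.Dict.empty).items).map (fun p => (p.1, p.2.items))) := by
  simp only [cant_precesores_por_palabra_alt]
  rw [pvStepB_eq]

-- the outer loops march in step: B's skip-insert loop mirrors A's ensure loop entrywise
lemma pvOuter (ws0 ws : List String) (d r : pvD2)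
    (hit : r.items = d.items.map (fun q => (q.1, pvPreds ws0 q.1))) :
    (ws.foldl (pvB ws0) r).items =
      (ws.foldl pvEns d).items.map (fun q => (q.1, pvPreds ws0 q.1)) := by
  induction ws generalizing d r with
  | nil => exact hit
  | cons w rest ih =>
    have hkeys : r.keys = d.keys := by
      simp only [PySem.Dict.keys, hit, List.map_map]
      rfl
    have hcont : r.contains w = d.contains w := by
      rw [PySem.Dict.contains_eq_decide_mem_keys, PySem.Dict.contains_eq_decide_mem_keys, hkeys]
    by_cases hw : d.contains w = true
    · rw [List.foldl_cons, List.foldl_cons,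
          show pvB ws0 r w = r from by simp [pvB, hcont, hw],
          show pvEns d w = d from by simp [pvEns, hw]]
      exact ih d r hit
    · simp only [Bool.not_eq_true] at hw
      rw [List.foldl_cons, List.foldl_cons,
          show pvB ws0 r w = r.insert w (pvPreds ws0 w) from by simp [pvB, hcont, hw],
          show pvEns d w = d.insert w PySem.Dict.empty from by simp [pvEns, hw]]
      apply ih
      rw [PySem.Dict.items_insert_of_not_contains _ _ (by rw [hcont]; exact hw),
          PySem.Dict.items_insert_of_not_contains _ _ hw, List.map_append, hit]
      rfl

-- ===== VERDICT (by name: the statement is the Claim_ definition above) =====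
theorem cant_precesores_por_palabra_spec : Claim_equal_cant_precesores_por_palabra := by
  intro cadena _
  unfold Spec_cant_precesores_por_palabra
  rw [pvA_eq, pvB_eq]
  simp only
  cases hws : (PySem.Str.split? cadena " ").getD [] with
  | nil => rfl
  | cons w rest =>
    rw [List.foldl_cons,
        show pvStepA (PySem.Dict.empty, none) w = (pvEns PySem.Dict.empty w, some w) from rfl,
        pvMain rest (pvEns PySem.Dict.empty w) w,
        show rest.foldl pvEns (pvEns PySem.Dict.empty w)
          = (w :: rest).foldl pvEns PySem.Dict.empty from rfl]
    have hnd : ((w :: rest).foldl pvEns PySem.Dict.empty).keys.Nodup :=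
      pvFold_ens_nodup _ _ (by simp)
    have hc : ∀ pc ∈ (w :: rest).zip rest,
        ((w :: rest).foldl pvEns PySem.Dict.empty).contains pc.2 = true := by
      intro pc hpc
      have hm : pc.2 ∈ rest := by
        have := List.of_mem_zip (show (pc.1, pc.2) ∈ (w :: rest).zip rest from by simpa using hpc)
        exact this.2
      exact pvFold_ens_contains_of_mem _ _ _ (List.mem_cons_of_mem w hm)
    rw [pvFold_cnt_items _ _ hc hnd,
        pvOuter (w :: rest) (w :: rest) PySem.Dict.empty PySem.Dict.empty rfl,
        List.map_map, List.map_map]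
    apply List.map_congr_left
    intro q hq
    have hq2 : q.2 = PySem.Dict.empty :=
      pvFold_ens_values (w :: rest) PySem.Dict.empty (by intro q hq; cases hq) q hq
    simp [Function.comp, pvPreds, hq2]
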